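-- pv_equiv track=rewrite | github.com/Bobcatsoap/jy-server | cell/RoomType13Calculator.py | find_planeWithSingle
-- ===== SOURCE A (Python) =====
-- def _find_bigger_continues_single(pre_cards, card2):
--     """
--     查找更大的连，
--     """
--     itm_cards = []
--     len_pre_cards = len(pre_cards)
--     index = 0
--     while index + len_pre_cards <= len(card2):
--         itm_cards_00 = card2[index:(index + len_pre_cards)]
--         if itm_cards_00[-1] != 15 and itm_cards_00[-1] > pre_cards[-1]:
--             if itm_cards_00[0] + len(itm_cards_00) - 1 == itm_cards_00[-1]:
--                 itm_cards.append(itm_cards_00)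
--         index += 1
--     return itm_cards
--
-- def find_planeWithSingle(card1, card2, room_info):
--     """
--     找大于指定牌的3张带1单飞机
--     """
--     if len(card2) < len(card1):
--         return []
--     card_1_plane = []
--     card_2_plane = []
--     for value_s in card1:
--         if card1.count(value_s) >= 3 and value_s not in card_1_plane:
--             card_1_plane.append(value_s)
--     card_1_plane.sort()
--     for value_s in card2:
--         if card2.count(value_s) >= 3 and value_s not in card_2_plane:
--             card_2_plane.append(value_s)
--     card_2_plane.sort()
--
--     bigger = []
--     itm_cards = _find_bigger_continues_single(card_1_plane, card_2_plane)
--     for v in itm_cards: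
--         if len(v) * 4 <= len(card2):
--             single_count = len(v)
--             v *= 3
--             v.extend([-1] * single_count)
--             bigger.append(v)
--     return bigger
-- ===== SOURCE B (Python) =====
-- def _triple_values(cards):
--     return sorted({v for v in cards if cards.count(v) >= 3})
--
-- def find_planeWithSingle(card1, card2, room_info):
--     if len(card2) < len(card1):
--         return []
--     p1 = _triple_values(card1)
--     p2 = _triple_values(card2)
--     threshold = p1[-1]
--     L = len(p1)
--     if L * 4 > len(card2):
--         return []
--     bigger = []
--     i = 0
--     n = len(p2)
--     while i < n:
--         j = i
--         while j + 1 < n and p2[j + 1] == p2[j] + 1: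
--             j += 1
--         for s in range(i, j - L + 2):
--             last = p2[s] + L - 1
--             if last != 15 and last > threshold:
--                 bigger.append(p2[s:s + L] * 3 + [-1] * L)
--         i = j + 1
--     return bigger
-- ===== Notes on version B (the rewrite author's own statement) =====
-- stated objective: alternative
-- what changed: B computes the triple values with a set comprehension + sorted instead of A's manual membership-checked dedup loop, and replaces A's sliding-window scan (one slice and consecutivity re-check per start index, plus a per-window length filter afterwards) by a single pass that groups the sorted triple values into maximal consecutive runs and emits each run's qualifying sub-windows directly, with the constant length check hoisted out of the loop.
import Mathlib
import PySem

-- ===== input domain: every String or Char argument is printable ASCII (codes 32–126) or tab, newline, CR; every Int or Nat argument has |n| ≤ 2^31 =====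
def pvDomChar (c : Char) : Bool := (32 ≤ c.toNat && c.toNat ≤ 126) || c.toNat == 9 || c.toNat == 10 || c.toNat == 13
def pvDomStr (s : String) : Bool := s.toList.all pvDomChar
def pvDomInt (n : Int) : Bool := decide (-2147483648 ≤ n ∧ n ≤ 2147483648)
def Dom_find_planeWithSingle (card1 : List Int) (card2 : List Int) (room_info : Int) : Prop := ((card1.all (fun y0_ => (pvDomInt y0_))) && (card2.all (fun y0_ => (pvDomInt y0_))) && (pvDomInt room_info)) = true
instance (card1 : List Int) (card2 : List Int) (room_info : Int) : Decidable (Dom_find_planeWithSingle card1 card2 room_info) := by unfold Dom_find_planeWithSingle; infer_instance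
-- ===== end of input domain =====

-- B replaces A's window-by-window scan over every start index (with a consecutivity
-- re-check per window) by one pass grouping the triple values into maximal consecutive
-- runs and emitting each run's sub-windows directly; objective: alternative decomposition.

-- ===== PORT A =====
-- A's helper `_find_bigger_continues_single`: the while-loop, as fuelled recursion over
-- the index; `none` = the IndexError Python raises on an empty slice / empty pre_cards.
def pvFBCSLoop (pre_cards card2 : List Int) (fuel : Nat) (index : Int)
    (acc : List (List Int)) : Option (List (List Int)) :=
  match fuel with
  | 0 => some acc
  | fuel + 1 =>
    if index + pre_cards.length ≤ (card2.length : Int) then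
      let w := PySem.List.slice card2 (some index) (some (index + pre_cards.length))
      match PySem.List.pyGet? w (-1), PySem.List.pyGet? pre_cards (-1) with
      | some last, some pl =>
        if last ≠ 15 ∧ pl < last then
          match PySem.List.pyGet? w 0 with
          | some w0 =>
            if w0 + (w.length : Int) - 1 = last then
              pvFBCSLoop pre_cards card2 fuel (index + 1) (acc ++ [w])
            else pvFBCSLoop pre_cards card2 fuel (index + 1) acc
          | none => none
        else pvFBCSLoop pre_cards card2 fuel (index + 1) acc
      | _, _ => none
    else some acc

-- A's dedup-then-sort of the values occurring ≥ 3 times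
def pvPlaneA (cards : List Int) : List Int :=
  PySem.List.sorted
    (cards.foldl (fun acc v =>
      if 3 ≤ PySem.List.count cards v ∧ v ∉ acc then acc ++ [v] else acc) [])
    id

def find_planeWithSingle (card1 : List Int) (card2 : List Int) (room_info : Int) : List (List Int) :=
  if card2.length < card1.length then []
  else
    let c1 := pvPlaneA card1
    let c2 := pvPlaneA card2
    match pvFBCSLoop c1 c2 (c2.length + 1) 0 [] with
    | none => []   -- Python raises IndexError here (card1 has no triple); excluded by Pre_
    | some itm =>
      itm.foldl (fun b v =>
        if (v.length : Int) * 4 ≤ (card2.length : Int) then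
          b ++ [(v ++ v ++ v) ++ List.replicate v.length (-1)]
        else b) []

-- ===== PORT B =====
-- sorted({v for v in cards if cards.count(v) >= 3})
def pvTriplesB (cards : List Int) : List Int :=
  PySem.List.sorted
    (PySem.Set.ofList (cards.filter (fun v => 3 ≤ PySem.List.count cards v))) id

-- inner while: extend j to the end of the maximal consecutive run
def pvRunEnd (p2 : List Int) (j : Nat) : Nat :=
  if h : j + 1 < p2.length then
    if PySem.List.pyGetD p2 ((j : Int) + 1) 0 = PySem.List.pyGetD p2 (j : Int) 0 + 1 then
      pvRunEnd p2 (j + 1)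
    else j
  else j
termination_by p2.length - j

-- for s in range(i, j - L + 2): emit the window starting at s if it beats the threshold
def pvEmitRun (p2 : List Int) (L : Nat) (thr : Int) (i j : Nat)
    (acc : List (List Int)) : List (List Int) :=
  (PySem.List.pyRange (i : Int) ((j : Int) - L + 2)).foldl
    (fun a s =>
      if (PySem.List.pyGetD p2 s 0 + L - 1 != 15) &&
         (thr < PySem.List.pyGetD p2 s 0 + L - 1) then
        a ++ [(let w := PySem.List.slice p2 (some s) (some (s + L));
               (w ++ w ++ w) ++ List.replicate L (-1))]
      else a)
    acc

-- lemma needed by pvScanRuns' termination (the run end is at or after its start)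
theorem pvRunEnd_ge (p2 : List Int) (j : Nat) : j ≤ pvRunEnd p2 j := by
  fun_induction pvRunEnd p2 j with
  | case1 j h hs ih => omega
  | case2 j h hs => omega
  | case3 j h => omega

-- outer while over run starts
def pvScanRuns (p2 : List Int) (L : Nat) (thr : Int) (i : Nat)
    (acc : List (List Int)) : List (List Int) :=
  if h : i < p2.length then
    let j := pvRunEnd p2 i
    pvScanRuns p2 L thr (j + 1) (pvEmitRun p2 L thr i j acc)
  else acc
termination_by p2.length - i
decreasing_by have := pvRunEnd_ge p2 i; omega

def find_planeWithSingle_alt (card1 : List Int) (card2 : List Int) (room_info : Int) : List (List Int) :=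
  if card2.length < card1.length then []
  else
    let p1 := pvTriplesB card1
    let p2 := pvTriplesB card2
    match PySem.List.pyGet? p1 (-1) with
    | none => []   -- Python raises IndexError here (card1 has no triple); excluded by Pre_
    | some threshold =>
      let L := p1.length
      if (card2.length : Int) < (L : Int) * 4 then []
      else pvScanRuns p2 L threshold 0 []

-- ===== PRECONDITION & SPEC =====
-- Pre_ excludes exactly the inputs where Python A raises IndexError: card2 at least as
-- long as card1 while card1 contains no value occurring three or more times (then
-- `pre_cards[-1]` / the empty slice's `[-1]` raise); B raises there too (p1[-1]).
def Pre_find_planeWithSingle (card1 : List Int) (card2 : List Int) (room_info : Int) : Prop :=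
  card2.length < card1.length ∨ ∃ v ∈ card1, [v, v, v].Sublist card1
instance (card1 : List Int) (card2 : List Int) (room_info : Int) : Decidable (Pre_find_planeWithSingle card1 card2 room_info) := by unfold Pre_find_planeWithSingle; infer_instance

def pvWitness_find_planeWithSingle : List Int × List Int × Int :=
  ([3, 3, 3], [4, 4, 4, 5, 5, 5, 1, 2, 9, 9, 9, 10], 0)

def Spec_find_planeWithSingle (card1 : List Int) (card2 : List Int) (room_info : Int) (out : List (List Int)) : Prop := out = find_planeWithSingle_alt card1 card2 room_info
instance (card1 : List Int) (card2 : List Int) (room_info : Int) (out : List (List Int)) : Decidable (Spec_find_planeWithSingle card1 card2 room_info out) := by unfold Spec_find_planeWithSingle; infer_instance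

-- ===== CLAIM (what is proved, stated in full; the proofs are below) =====
def Claim_equal_find_planeWithSingle : Prop := ∀ (card1 : List Int) (card2 : List Int) (room_info : Int), Dom_find_planeWithSingle card1 card2 room_info → Pre_find_planeWithSingle card1 card2 room_info → Spec_find_planeWithSingle card1 card2 room_info (find_planeWithSingle card1 card2 room_info)

-- ===== LEMMAS AND PROOFS =====

def pvOkB (p : List Int) (L : Nat) (thr : Int) (s : Nat) : Bool :=
  (p.getD (s + L - 1) 0 != 15) && decide (thr < p.getD (s + L - 1) 0) &&
  (p.getD s 0 + (L : Int) - 1 == p.getD (s + L - 1) 0)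

def pvWin (p : List Int) (L s : Nat) : List Int := List.take L (List.drop s p)

def pvExpand (L : Nat) (w : List Int) : List Int := (w ++ w ++ w) ++ List.replicate L (-1)

def pvRef (p : List Int) (L : Nat) (thr : Int) (s : Nat) : List (List Int) :=
  if _h : s + L ≤ p.length ∧ 1 ≤ L then
    (if pvOkB p L thr s then [pvWin p L s] else []) ++ pvRef p L thr (s + 1)
  else []
termination_by p.length - s
decreasing_by omega

def pvSeg (p : List Int) (L : Nat) (thr : Int) : Nat → Nat → List (List Int)
  | _, 0 => []
  | i, d + 1 =>
    (if (i + L ≤ p.length ∧ 1 ≤ L) ∧ pvOkB p L thr i then [pvWin p L i] else []) ++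
    pvSeg p L thr (i + 1) d

-- some value occurs three times in l ↔ [v, v, v] is a sublist of l
theorem pvTripleSub (v : Int) (l : List Int) : [v, v, v].Sublist l ↔ 3 ≤ PySem.List.count l v := by
  rw [PySem.List.count, show [v, v, v] = List.replicate 3 v from rfl, List.replicate_sublist_iff]

theorem pvPyGet_neg_one (xs : List Int) : PySem.List.pyGet? xs (-1) = xs.getLast? := by
  cases xs with
  | nil => simp [PySem.List.pyGet?, PySem.List.pyIdx?]
  | cons a t => simp [PySem.List.pyGet?, PySem.List.pyIdx?, List.getLast?_eq_getElem?]

theorem pvGap (p : List Int) (hp : List.Pairwise (· < ·) p) (a b : Nat)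
    (hab : a ≤ b) (hb : b < p.length) :
    p.getD a 0 + ((b : Int) - a) ≤ p.getD b 0 := by
  induction b, hab using Nat.le_induction with
  | base => simp
  | succ b hab ih =>
    have hblt : b < p.length := by omega
    have h1 := ih hblt
    have h2 : p[b] < p[b + 1] := List.pairwise_iff_getElem.mp hp b (b + 1) hblt hb (by omega)
    rw [List.getD_eq_getElem p 0 hblt] at h1
    rw [List.getD_eq_getElem p 0 hb, List.getD_eq_getElem p 0 hblt] at *
    push_cast
    omega

theorem pvFoldA_invar (cards : List Int) (l : List Int) (acc : List Int) (hacc : acc.Nodup) :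
    (l.foldl (fun acc v =>
        if 3 ≤ PySem.List.count cards v ∧ v ∉ acc then acc ++ [v] else acc) acc).Nodup ∧
    ∀ x, x ∈ l.foldl (fun acc v =>
        if 3 ≤ PySem.List.count cards v ∧ v ∉ acc then acc ++ [v] else acc) acc ↔
      x ∈ acc ∨ (x ∈ l ∧ 3 ≤ PySem.List.count cards x) := by
  induction l generalizing acc with
  | nil => simpa using hacc
  | cons v t ih =>
    simp only [List.foldl_cons]
    by_cases hc : 3 ≤ PySem.List.count cards v ∧ v ∉ acc
    · rw [if_pos hc]
      have hnd : (acc ++ [v]).Nodup := by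
        simp only [List.nodup_append, List.nodup_singleton, hacc, true_and, List.mem_singleton]
        intro a ha b hb
        exact fun he => hc.2 ((hb ▸ he : a = v) ▸ ha)
      obtain ⟨n1, m1⟩ := ih (acc ++ [v]) hnd
      refine ⟨n1, fun x => ?_⟩
      rw [m1 x]
      simp only [List.mem_append, List.mem_cons, List.not_mem_nil, or_false]
      constructor
      · rintro (⟨h | rfl⟩ | ⟨hx, hcx⟩)
        · exact Or.inl h
        · exact Or.inr ⟨Or.inl rfl, hc.1⟩
        · exact Or.inr ⟨Or.inr hx, hcx⟩
      · rintro (h | ⟨(rfl | hx), hcx⟩)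
        · exact Or.inl (Or.inl h)
        · exact Or.inl (Or.inr rfl)
        · exact Or.inr ⟨hx, hcx⟩
    · rw [if_neg hc]
      obtain ⟨n1, m1⟩ := ih acc hacc
      refine ⟨n1, fun x => ?_⟩
      rw [m1 x]
      simp only [List.mem_cons]
      constructor
      · rintro (h | ⟨hx, hcx⟩)
        · exact Or.inl h
        · exact Or.inr ⟨Or.inr hx, hcx⟩
      · rintro (h | ⟨(rfl | hx), hcx⟩)
        · exact Or.inl h
        · rcases Decidable.em (x ∈ acc) with hm | hm
          · exact Or.inl hm
          · exact absurd ⟨hcx, hm⟩ hc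
        · exact Or.inr ⟨hx, hcx⟩

theorem pvTriplesB_mem (cards : List Int) (x : Int) :
    x ∈ pvTriplesB cards ↔ x ∈ cards ∧ 3 ≤ PySem.List.count cards x := by
  unfold pvTriplesB
  rw [(PySem.List.sorted_perm _ id false).mem_iff, PySem.Set.mem_ofList, List.mem_filter]
  simp

theorem pvTriplesB_nodup (cards : List Int) : (pvTriplesB cards).Nodup := by
  unfold pvTriplesB
  exact (PySem.List.sorted_perm _ id false).nodup_iff.mpr (PySem.Set.nodup_ofList _)

theorem pvTriplesB_sorted (cards : List Int) : List.Pairwise (· < ·) (pvTriplesB cards) := by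
  have h1 := PySem.List.sorted_pairwise
    (PySem.Set.ofList (cards.filter (fun v => 3 ≤ PySem.List.count cards v)) : List Int) (id)
  have h2 : List.Pairwise (· ≠ ·) (pvTriplesB cards) := (pvTriplesB_nodup cards)
  exact (h1.and h2).imp (fun h => lt_of_le_of_ne h.1 h.2)

theorem pvPlaneA_eq (cards : List Int) : pvPlaneA cards = pvTriplesB cards := by
  obtain ⟨hnd, hmem⟩ := pvFoldA_invar cards cards [] List.nodup_nil
  unfold pvPlaneA
  refine PySem.List.sorted_eq_of_perm_of_pairwise_lt _ _ id ?_ (pvTriplesB_sorted cards)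
  refine ((List.perm_ext_iff_of_nodup (pvTriplesB_nodup cards) hnd).mpr ?_)
  intro a
  rw [pvTriplesB_mem, hmem]
  simp

theorem pvWin_getD (p : List Int) (L s i : Nat) (h : s + L ≤ p.length) (hi : i < L) :
    (pvWin p L s)[i]? = some (p.getD (s + i) 0) := by
  rw [pvWin, List.getElem?_eq_getElem (by simp; omega)]
  rw [List.getElem_take, List.getElem_drop]
  rw [List.getD_eq_getElem p 0 (by omega)]

theorem pvLoopA (p1 p : List Int) (thr : Int) (hthr : PySem.List.pyGet? p1 (-1) = some thr)
    (fuel : Nat) : ∀ (s : Nat) (acc : List (List Int)), p.length ≤ fuel + s →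
    pvFBCSLoop p1 p fuel (s : Int) acc = some (acc ++ pvRef p p1.length thr s) := by
  have hthr' : p1.getLast? = some thr := by rw [← pvPyGet_neg_one]; exact hthr
  have hL : 1 ≤ p1.length := by
    rcases p1 with _ | ⟨a, t⟩
    · simp at hthr'
    · simp
  induction fuel with
  | zero =>
    intro s acc hfuel
    rw [pvRef, dif_neg (by omega)]
    simp [pvFBCSLoop]
  | succ fuel ih =>
    intro s acc hfuel
    by_cases hc : s + p1.length ≤ p.length
    · have hcast : (s : Int) + (p1.length : Int) = ((s + p1.length : Nat) : Int) := by push_cast; ring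
      have hcond : (s : Int) + (p1.length : Int) ≤ (p.length : Int) := by exact_mod_cast hc
      rw [pvFBCSLoop]
      simp only [hcast, if_pos (hcast ▸ hcond), PySem.List.slice_natCast]
      have hwin : List.take (s + p1.length - s) (List.drop s p) = pvWin p p1.length s := by
        rw [pvWin, Nat.add_sub_cancel_left]
      rw [hwin]
      have hwlen : (pvWin p p1.length s).length = p1.length := by
        simp [pvWin]; omega
      have hlast : (pvWin p p1.length s).getLast? = some (p.getD (s + p1.length - 1) 0) := by
        rw [List.getLast?_eq_getElem?, hwlen]
        rw [pvWin_getD p p1.length s (p1.length - 1) hc (by omega)]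
        congr 2
        omega
      have hhead : PySem.List.pyGet? (pvWin p p1.length s) 0 = some (p.getD s 0) := by
        have h1 := pvWin_getD p p1.length s 0 hc (by omega)
        rw [Nat.add_zero] at h1
        rw [← h1]
        simpa using PySem.List.pyGet?_natCast (pvWin p p1.length s) 0
      simp only [pvPyGet_neg_one, hlast, hthr', hhead]
      set last := p.getD (s + p1.length - 1) 0 with hlastdef
      have hscast : (s : Int) + 1 = ((s + 1 : Nat) : Int) := by push_cast; ring
      have hfuel' : p.length ≤ fuel + (s + 1) := by omega
      rw [pvRef, dif_pos ⟨hc, hL⟩]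
      by_cases h15 : last = (15 : Int)
      · have hng : ¬ (last ≠ 15 ∧ thr < last) := by simp [h15]
        rw [if_neg hng]
        have hok : pvOkB p p1.length thr s = false := by
          rw [pvOkB, ← hlastdef]
          simp [h15]
        rw [hok, hscast, ih (s+1) acc hfuel']
        simp
      · by_cases hgt : thr < last
        · rw [if_pos ⟨h15, hgt⟩]
          by_cases hcons : p.getD s 0 + ((pvWin p p1.length s).length : Int) - 1 = last
          · rw [if_pos hcons]
            have hok : pvOkB p p1.length thr s = true := by
              rw [hwlen] at hcons
              rw [pvOkB, ← hlastdef]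
              simp [h15, hgt]
              simpa using hcons
            rw [hok, hscast, ih (s+1) (acc ++ [pvWin p p1.length s]) hfuel']
            simp
          · rw [if_neg hcons]
            have hok : pvOkB p p1.length thr s = false := by
              rw [hwlen] at hcons
              rw [pvOkB, ← hlastdef]
              simp only [Bool.and_eq_false_iff, beq_eq_false_iff_ne, ne_eq]
              exact Or.inr hcons
            rw [hok, hscast, ih (s+1) acc hfuel']
            simp
        · have hng : ¬ (last ≠ 15 ∧ thr < last) := by tauto
          rw [if_neg hng]
          have hok : pvOkB p p1.length thr s = false := by
            rw [pvOkB, ← hlastdef]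
            simp [hgt]
          rw [hok, hscast, ih (s+1) acc hfuel']
          simp
    · rw [pvFBCSLoop, pvRef, dif_neg (by omega)]
      rw [if_neg (by omega)]
      simp

theorem pvRef_len (p : List Int) (L : Nat) (thr : Int) (s : Nat) :
    ∀ v ∈ pvRef p L thr s, v.length = L := by
  fun_induction pvRef p L thr s with
  | case1 s h ih =>
    intro v hv
    rcases List.mem_append.mp hv with h1 | h2
    · have : v = pvWin p L s := by
        rcases Decidable.em (pvOkB p L thr s = true) with hb | hb
        · simpa [hb] using h1
        · simp [Bool.not_eq_true] at hb; simp [hb] at h1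
      subst this
      simp [pvWin]; omega
    · exact ih v h2
  | case2 s h => intro v hv; simp at hv

theorem pvFoldExpand (n2 : Int) (L : Nat) (W : List (List Int)) (b : List (List Int))
    (hlen : ∀ v ∈ W, v.length = L) :
    W.foldl (fun b v =>
        if (v.length : Int) * 4 ≤ n2 then
          b ++ [(v ++ v ++ v) ++ List.replicate v.length (-1)]
        else b) b
      = if (L : Int) * 4 ≤ n2 then b ++ W.map (pvExpand L) else b := by
  induction W generalizing b with
  | nil => simp
  | cons v t ih =>
    have hv : v.length = L := hlen v List.mem_cons_self
    simp only [List.foldl_cons, hv]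
    have ih' := ih (if (L : Int) * 4 ≤ n2 then b ++ [(v ++ v ++ v) ++ List.replicate L (-1)] else b)
      (fun u hu => hlen u (List.mem_cons_of_mem v hu))
    rw [ih']
    by_cases hcond : (L : Int) * 4 ≤ n2
    · rw [if_pos hcond, if_pos hcond, if_pos hcond]
      simp [pvExpand]
    · rw [if_neg hcond, if_neg hcond, if_neg hcond]

theorem pvGetD_int (p : List Int) (k : Nat) :
    PySem.List.pyGetD p (k : Int) 0 = p.getD k 0 := PySem.List.pyGetD_natCast p k 0

theorem pvRunEnd_lt (p : List Int) (i : Nat) (h : i < p.length) : pvRunEnd p i < p.length := by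
  fun_induction pvRunEnd p i with
  | case1 j hj hs ih => exact ih (by omega)
  | case2 j hj hs => omega
  | case3 j hj => omega

theorem pvRunEnd_step (p : List Int) (i : Nat) :
    ∀ k, i ≤ k → k < pvRunEnd p i → p.getD (k + 1) 0 = p.getD k 0 + 1 := by
  fun_induction pvRunEnd p i with
  | case1 j hj hs ih =>
    intro k hk1 hk2
    rcases Nat.eq_or_lt_of_le hk1 with heq | hlt
    · rw [← heq, ← pvGetD_int, ← pvGetD_int p j]
      exact_mod_cast hs
    · exact ih k hlt hk2
  | case2 j hj hs => intro k h1 h2; omega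
  | case3 j hj => intro k h1 h2; omega

theorem pvRunEnd_boundary (p : List Int) (i : Nat)
    (hb : pvRunEnd p i + 1 < p.length) :
    p.getD (pvRunEnd p i + 1) 0 ≠ p.getD (pvRunEnd p i) 0 + 1 := by
  fun_induction pvRunEnd p i with
  | case1 j hj hs ih => exact ih hb
  | case2 j hj hs =>
    rw [← pvGetD_int, ← pvGetD_int p j]
    intro hcon
    apply hs
    exact_mod_cast hcon
  | case3 j hj => omega

theorem pvSeg_nil (p : List Int) (L : Nat) (thr : Int) (d : Nat) :
    ∀ i, p.length < i + L → pvSeg p L thr i d = [] := by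
  induction d with
  | zero => intro i h; rfl
  | succ d ih =>
    intro i h
    show (if (i + L ≤ p.length ∧ 1 ≤ L) ∧ pvOkB p L thr i then [pvWin p L i] else []) ++
      pvSeg p L thr (i + 1) d = []
    rw [if_neg (by omega), ih (i + 1) (by omega)]
    rfl

theorem pvRef_split (p : List Int) (L : Nat) (thr : Int) (hL : 1 ≤ L) (d : Nat) :
    ∀ i, pvRef p L thr i = pvSeg p L thr i d ++ pvRef p L thr (i + d) := by
  induction d with
  | zero => intro i; rfl
  | succ d ih =>
    intro i
    by_cases hc : i + L ≤ p.length
    · rw [pvRef, dif_pos ⟨hc, hL⟩]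
      show _ = (if (i + L ≤ p.length ∧ 1 ≤ L) ∧ pvOkB p L thr i then [pvWin p L i] else []) ++
        pvSeg p L thr (i + 1) d ++ pvRef p L thr (i + (d + 1))
      rw [List.append_assoc]
      have : i + (d + 1) = (i + 1) + d := by omega
      rw [this, ← ih (i + 1)]
      by_cases hb : pvOkB p L thr i
      · rw [if_pos hb, if_pos ⟨⟨hc, hL⟩, hb⟩]
      · rw [if_neg (by simp [Bool.not_eq_true] at hb; simp [hb]), if_neg (by simp [hb])]
    · rw [pvRef, dif_neg (by omega)]
      rw [pvSeg_nil p L thr (d+1) i (by omega)]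
      rw [show pvRef p L thr (i + (d+1)) = [] from by rw [pvRef, dif_neg (by omega)]]
      rfl

theorem pvRunVal (p : List Int) (i j : Nat)
    (hstep : ∀ k, i ≤ k → k < j → p.getD (k + 1) 0 = p.getD k 0 + 1) :
    ∀ m, i ≤ m → m ≤ j → p.getD m 0 = p.getD i 0 + ((m : Int) - i) := by
  intro m him hmj
  induction m, him using Nat.le_induction with
  | base => simp
  | succ m him ih =>
    rw [hstep m him (by omega), ih (by omega)]
    push_cast
    ring

theorem pvSegCross (p : List Int) (L : Nat) (thr : Int) (hp : List.Pairwise (· < ·) p)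
    (j : Nat) (hj : j < p.length)
    (hbnd : j + 1 < p.length → p.getD (j + 1) 0 ≠ p.getD j 0 + 1)
    (d : Nat) : ∀ s, j + 1 < s + L → s + d ≤ j + 1 → pvSeg p L thr s d = [] := by
  induction d with
  | zero => intro s _ _; rfl
  | succ d ih =>
    intro s hcross hsd
    show (if (s + L ≤ p.length ∧ 1 ≤ L) ∧ pvOkB p L thr s then [pvWin p L s] else []) ++
      pvSeg p L thr (s + 1) d = []
    rw [ih (s + 1) (by omega) (by omega), List.append_nil]
    by_cases hsl : s + L ≤ p.length
    · have hjn : j + 1 < p.length := by omega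
      have gap1 := pvGap p hp s j (by omega) (by omega)
      have gap2 := pvGap p hp (j + 1) (s + L - 1) (by omega) (by omega)
      have gap3 := pvGap p hp j (j + 1) (by omega) hjn
      have hne := hbnd hjn
      have hfalse : ¬ (p.getD s 0 + (L : Int) - 1 = p.getD (s + L - 1) 0) := by omega
      rw [if_neg ?_]
      rintro ⟨-, hok⟩
      rw [pvOkB] at hok
      simp only [Bool.and_eq_true, beq_iff_eq] at hok
      exact hfalse hok.2
    · rw [if_neg (by omega)]

theorem pvEmitEq (p : List Int) (L : Nat) (thr : Int) (hp : List.Pairwise (· < ·) p)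
    (hL : 1 ≤ L) (j : Nat) (hj : j < p.length)
    (hbnd : j + 1 < p.length → p.getD (j + 1) 0 ≠ p.getD j 0 + 1)
    (d : Nat) : ∀ (i : Nat), i + d = j + 1 →
    (∀ k, i ≤ k → k < j → p.getD (k + 1) 0 = p.getD k 0 + 1) →
    ∀ acc, pvEmitRun p L thr i j acc = acc ++ (pvSeg p L thr i d).map (pvExpand L) := by
  induction d with
  | zero =>
    intro i hi _ acc
    rw [pvEmitRun, PySem.List.pyRange_one_eq_nil (by omega)]
    simp [pvSeg]
  | succ d ih =>
    intro i hi hstep acc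
    by_cases hin : (i : Int) < (j : Int) - L + 2
    · rw [pvEmitRun, PySem.List.pyRange_one_cons hin]
      rw [List.foldl_cons]
      have hval : p.getD (i + L - 1) 0 = p.getD i 0 + (L : Int) - 1 := by
        have := pvRunVal p i j hstep (i + L - 1) (by omega) (by omega)
        omega
      have hokeq : pvOkB p L thr i =
          ((p.getD i 0 + (L : Int) - 1 != 15) && decide (thr < p.getD i 0 + (L : Int) - 1)) := by
        rw [pvOkB, hval]
        simp
      have hgi : PySem.List.pyGetD p (i : Int) 0 = p.getD i 0 := pvGetD_int p i
      have hslice : PySem.List.slice p (some (i : Int)) (some ((i : Int) + L)) = pvWin p L i := by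
        rw [show (i : Int) + (L : Int) = ((i + L : Nat) : Int) by push_cast; ring,
          PySem.List.slice_natCast, pvWin, Nat.add_sub_cancel_left]
      have hrest : ∀ a, (PySem.List.pyRange ((i : Int) + 1) ((j : Int) - L + 2)).foldl
          (fun a s =>
            if (PySem.List.pyGetD p s 0 + L - 1 != 15) &&
               (thr < PySem.List.pyGetD p s 0 + L - 1) then
              a ++ [(let w := PySem.List.slice p (some s) (some (s + L));
                     (w ++ w ++ w) ++ List.replicate L (-1))]
            else a) a = pvEmitRun p L thr (i + 1) j a := by
        intro a
        rw [pvEmitRun, show ((i + 1 : Nat) : Int) = (i : Int) + 1 by push_cast; ring]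
      by_cases hB : ((p.getD i 0 + (L : Int) - 1 != 15) && decide (thr < p.getD i 0 + (L : Int) - 1)) = true
      · have hcond : ((PySem.List.pyGetD p (i : Int) 0 + L - 1 != 15) &&
            decide (thr < PySem.List.pyGetD p (i : Int) 0 + L - 1)) = true := by
          rw [hgi]; exact hB
        simp only [hcond, if_true, hslice]
        rw [hrest, ih (i + 1) (by omega) (fun k hk1 hk2 => hstep k (by omega) hk2)]
        have hseg : pvSeg p L thr i (d + 1) = [pvWin p L i] ++ pvSeg p L thr (i + 1) d := by
          show (if _ then _ else _) ++ _ = _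
          rw [if_pos ⟨⟨by omega, hL⟩, by rw [hokeq]; exact hB⟩]
        rw [hseg]
        simp [pvExpand]
      · have hBf : ((p.getD i 0 + (L : Int) - 1 != 15) &&
            decide (thr < p.getD i 0 + (L : Int) - 1)) = false := by
          exact Bool.eq_false_iff.mpr hB
        have hcond : ((PySem.List.pyGetD p (i : Int) 0 + L - 1 != 15) &&
            decide (thr < PySem.List.pyGetD p (i : Int) 0 + L - 1)) = false := by
          rw [hgi]; exact hBf
        simp only [hcond, Bool.false_eq_true, if_false]
        rw [hrest, ih (i + 1) (by omega) (fun k hk1 hk2 => hstep k (by omega) hk2)]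
        have hseg : pvSeg p L thr i (d + 1) = pvSeg p L thr (i + 1) d := by
          show (if _ then _ else _) ++ _ = _
          rw [if_neg ?_]
          · simp
          · rintro ⟨-, hok⟩
            rw [hokeq] at hok
            exact hB hok
        rw [hseg]
    · rw [pvEmitRun, PySem.List.pyRange_one_eq_nil (by omega)]
      rw [pvSegCross p L thr hp j hj hbnd (d + 1) i (by omega) (by omega)]
      simp

theorem pvScanB (p : List Int) (L : Nat) (thr : Int) (hp : List.Pairwise (· < ·) p)
    (hL : 1 ≤ L) (i : Nat) (acc : List (List Int)) :
    pvScanRuns p L thr i acc = acc ++ (pvRef p L thr i).map (pvExpand L) := by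
  fun_induction pvScanRuns p L thr i acc with
  | case1 i acc h j ih =>
    have hge : i ≤ j := pvRunEnd_ge p i
    have hlt : j < p.length := pvRunEnd_lt p i h
    rw [ih]
    rw [pvEmitEq p L thr hp hL j hlt (fun hb => pvRunEnd_boundary p i hb)
      (j + 1 - i) i (by omega) (fun k hk1 hk2 => pvRunEnd_step p i k hk1 hk2) acc]
    rw [pvRef_split p L thr hL (j + 1 - i) i, show i + (j + 1 - i) = j + 1 by omega]
    simp [List.append_assoc]
  | case2 i acc h =>
    rw [pvRef, dif_neg (by omega)]
    simp

theorem find_planeWithSingle_witness_ok :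
    Dom_find_planeWithSingle pvWitness_find_planeWithSingle.1 pvWitness_find_planeWithSingle.2.1 pvWitness_find_planeWithSingle.2.2 ∧
    Pre_find_planeWithSingle pvWitness_find_planeWithSingle.1 pvWitness_find_planeWithSingle.2.1 pvWitness_find_planeWithSingle.2.2 := by
  constructor <;> decide

-- ===== VERDICT (by name: the statement is the Claim_ definition above) =====
theorem find_planeWithSingle_spec : Claim_equal_find_planeWithSingle := by
  intro card1 card2 room_info hdom hpre
  unfold Spec_find_planeWithSingle
  by_cases hlen : card2.length < card1.length
  · simp only [find_planeWithSingle, find_planeWithSingle_alt, if_pos hlen]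
  · have hex : ∃ v ∈ card1, 3 ≤ PySem.List.count card1 v := by
      rcases hpre with h | h
      · omega
      · obtain ⟨w, hw1, hw3⟩ := h
        exact ⟨w, hw1, (pvTripleSub w card1).mp hw3⟩
    obtain ⟨v, hv1, hv2⟩ := hex
    have hvmem : v ∈ pvTriplesB card1 := (pvTriplesB_mem card1 v).mpr ⟨hv1, hv2⟩
    have hne : pvTriplesB card1 ≠ [] := List.ne_nil_of_mem hvmem
    have hL : 1 ≤ (pvTriplesB card1).length := by
      rcases h : pvTriplesB card1 with _ | ⟨a, t⟩
      · exact absurd h hne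
      · simp
    obtain ⟨thr, hthr'⟩ : ∃ thr, (pvTriplesB card1).getLast? = some thr := by
      rcases h : (pvTriplesB card1).getLast? with _ | thr
      · exact absurd (List.getLast?_eq_none_iff.mp h) hne
      · exact ⟨thr, rfl⟩
    have hthr : PySem.List.pyGet? (pvTriplesB card1) (-1) = some thr := by
      rw [pvPyGet_neg_one]; exact hthr'
    have hloop := pvLoopA (pvTriplesB card1) (pvTriplesB card2) thr hthr
      ((pvTriplesB card2).length + 1) 0 [] (by omega)
    rw [Nat.cast_zero, List.nil_append] at hloop
    simp only [find_planeWithSingle, find_planeWithSingle_alt, if_neg hlen,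
      pvPlaneA_eq, hloop, hthr]
    rw [pvFoldExpand ((card2.length : Int)) (pvTriplesB card1).length _ []
      (pvRef_len (pvTriplesB card2) (pvTriplesB card1).length thr 0)]
    rw [pvScanB (pvTriplesB card2) (pvTriplesB card1).length thr
      (pvTriplesB_sorted card2) hL 0 []]
    by_cases hq : ((pvTriplesB card1).length : Int) * 4 ≤ (card2.length : Int)
    · rw [if_pos hq, if_neg (by omega)]
    · rw [if_neg hq, if_pos (by omega)]
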